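-- pv_equiv track=rewrite | github.com/L273/Cryptology- | 基于密码算法的服务器/大作业项目文件/备份/Client.py | re_hash
-- ===== SOURCE A (Python) =====
-- def re_hash(hash):
--     #因为是小端存储，返回的时候，要再度使用reverse，以便人的读取
--     j=0
--     re_hash=""
--     for i in hash:
--         while(i!=0):
--             j = j + i%256;
--             j=j<<8;
--             i=i>>8;
--         j=j>>8
--         j_temp=str(hex(j)).replace('0x','')
--         while(len(j_temp)<8):
--             #专门对付j开头是0的情况
--             j_temp = '0' + j_temp
--         re_hash = re_hash + j_temp
--         j=0
--     return re_hash
-- ===== SOURCE B (Python) =====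
-- def re_hash(hash):
--     out = []
--     for i in hash:
--         n = (i.bit_length() + 7) // 8
--         rev = int.from_bytes(i.to_bytes(n, 'little'), 'big')
--         out.append(format(rev, 'x').zfill(8))
--     return ''.join(out)
-- ===== Notes on version B (the rewrite author's own statement) =====
-- stated objective: idiomatic
-- what changed: Replaces A's per-byte shift/accumulate while-loop and the prepend-'0' padding while-loop with a single bytes round-trip (to_bytes little / from_bytes big) plus format(...,'x').zfill(8); Pre_ excludes lists with a negative element, on which A loops forever (i>>8 never reaches 0) and B raises OverflowError.
import Mathlib
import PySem

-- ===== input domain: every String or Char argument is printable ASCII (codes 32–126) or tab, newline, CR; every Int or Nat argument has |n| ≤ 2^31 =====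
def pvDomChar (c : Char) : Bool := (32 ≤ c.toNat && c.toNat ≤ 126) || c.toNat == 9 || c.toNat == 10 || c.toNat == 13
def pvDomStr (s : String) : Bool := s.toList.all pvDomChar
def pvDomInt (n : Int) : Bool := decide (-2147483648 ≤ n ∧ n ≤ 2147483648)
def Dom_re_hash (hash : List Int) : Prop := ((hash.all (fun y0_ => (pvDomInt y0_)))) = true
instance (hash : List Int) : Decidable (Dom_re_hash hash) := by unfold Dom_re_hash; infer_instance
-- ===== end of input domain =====

-- B replaces A's per-byte shift/accumulate while-loop and its prepend-'0' padding loop by a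
-- bytes round-trip (little-endian byte list folded back big-endian) plus hex-format and zfill
-- (objective: idiomatic). Pre_ excludes negative elements: A loops forever there.

-- ===== PORT A =====
-- inner 'while(i!=0)' of A: j = (j + i%256) << 8; i = i >> 8.  Fuel-totalized structural
-- recursion; fuel i.toNat+1 always suffices for the nonnegative i admitted by Pre_.
def byteRevLoop : Nat → Int → Int → Int
  | 0, _, j => j
  | fuel+1, i, j =>
    if i = 0 then j
    else byteRevLoop fuel (i >>> (8:Nat)) ((j + PySem.Int.mod i 256) <<< (8:Nat))

-- str(hex(j)).replace('0x','') — exact: hex(j) is '0x…'/'-0x…' with lowercase digits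
def pyHex (j : Int) : List Char :=
  if j < 0 then '-' :: Nat.toDigits 16 j.natAbs else Nat.toDigits 16 j.toNat

-- "while(len(j_temp)<8): j_temp = '0' + j_temp" — each pass prepends one char, so 8 fuel suffices
def padWhile : Nat → List Char → List Char
  | 0, s => s
  | f+1, s => if s.length < 8 then padWhile f ('0' :: s) else s

-- strings are ASCII hex digits, ported on List Char (PySem convention)
def re_hash (hash : List Int) : String :=
  String.mk (hash.foldl (fun acc i =>
    acc ++ padWhile 8 (pyHex ((byteRevLoop (i.toNat + 1) i 0) >>> (8:Nat)))) [])

-- ===== PORT B =====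
-- i.to_bytes(n,'little'): the n little-endian base-256 digits (exact for 0 ≤ i < 256^n, the
-- range Pre_ admits; Python raises OverflowError outside it)
def leBytes : Nat → Nat → List Nat
  | 0, _ => []
  | k+1, x => x % 256 :: leBytes k (x / 256)

def re_hash_alt (hash : List Int) : String :=
  String.mk ((hash.map (fun i =>
    let n := (PySem.Int.bitLength i + 7) / 8
    let rev := (leBytes n i.toNat).foldl (fun a b => a * 256 + b) 0
    let s := Nat.toDigits 16 rev
    List.replicate (8 - s.length) '0' ++ s)).flatten)

-- ===== PRECONDITION & SPEC =====
-- Pre_ excludes lists containing a negative element: there A's inner while-loop never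
-- terminates (i >> 8 stays negative), so A returns on exactly the all-nonnegative lists.
def Pre_re_hash (hash : List Int) : Prop := ∀ i ∈ hash, 0 ≤ i
instance (hash : List Int) : Decidable (Pre_re_hash hash) := by unfold Pre_re_hash; infer_instance

def pvWitness_re_hash : List Int := [0, 1, 256, 305419896]

def Spec_re_hash (hash : List Int) (out : String) : Prop := out = re_hash_alt hash
instance (hash : List Int) (out : String) : Decidable (Spec_re_hash hash out) := by unfold Spec_re_hash; infer_instance

-- ===== CLAIM (what is proved, stated in full; the proofs are below) =====
def Claim_equal_re_hash : Prop := ∀ (hash : List Int), Dom_re_hash hash → Pre_re_hash hash → Spec_re_hash hash (re_hash hash)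

-- ===== LEMMAS AND PROOFS =====

-- byte count of x in base 256 (proof-side characterization)
def bLen (x : Nat) : Nat :=
  if h : x = 0 then 0 else bLen (x / 256) + 1
decreasing_by exact Nat.div_lt_self (Nat.pos_of_ne_zero h) (by norm_num)

-- the byte-reversed value both programs compute
def revNat (x : Nat) : Nat := (leBytes (bLen x) x).foldl (fun a b => a * 256 + b) 0

lemma bLen_zero : bLen 0 = 0 := by unfold bLen; simp

lemma bLen_pos (x : Nat) (h : x ≠ 0) : bLen x = bLen (x / 256) + 1 := by
  conv_lhs => rw [bLen]
  simp [h]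

lemma foldl_mul_add (l : List Nat) : ∀ a : Nat,
    l.foldl (fun a b => a * 256 + b) a = a * 256 ^ l.length + l.foldl (fun a b => a * 256 + b) 0 := by
  induction l with
  | nil => simp
  | cons b t ih =>
    intro a
    simp only [List.foldl_cons, List.length_cons]
    rw [ih (a * 256 + b), ih (0 * 256 + b)]
    ring

lemma revNat_rec (x : Nat) (h : x ≠ 0) :
    revNat x = x % 256 * 256 ^ bLen (x / 256) + revNat (x / 256) := by
  unfold revNat
  rw [bLen_pos x h]
  simp only [leBytes, List.foldl_cons]
  have hlen : ∀ k y, (leBytes k y).length = k := by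
    intro k; induction k with
    | zero => intro y; simp [leBytes]
    | succ n ih => intro y; simp [leBytes, ih]
  rw [foldl_mul_add]
  simp [hlen]

lemma bitLength_unique (x k : Nat) (h2 : 2 ^ (k - 1) ≤ x) (h : x < 2 ^ k) (hk : 1 ≤ k) :
    PySem.Int.bitLength (x : Int) = k := by
  have hx : (x : Int) ≠ 0 := by
    have : 1 ≤ x := le_trans (Nat.one_le_two_pow) h2
    exact_mod_cast Nat.one_le_iff_ne_zero.mp this
  have a := PySem.Int.lt_two_pow_bitLength (x : Int)
  have b := PySem.Int.two_pow_bitLength_le (x : Int) hx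
  rw [Int.natAbs_natCast] at a b
  set m := PySem.Int.bitLength (x : Int) with hm
  rcases lt_trichotomy m k with hlt | heq | hgt
  · exfalso
    have : (2:Nat) ^ m ≤ 2 ^ (k - 1) := Nat.pow_le_pow_right (by norm_num) (by omega)
    omega
  · exact heq
  · exfalso
    have hm1 : 1 ≤ m := by
      by_contra hc
      have : m = 0 := by omega
      simp [this] at a
      omega
    have : (2:Nat) ^ k ≤ 2 ^ (m - 1) := Nat.pow_le_pow_right (by norm_num) (by omega)
    omega

-- (bit_length(x) + 7) // 8 = number of base-256 bytes of x
lemma n_eq_bLen : ∀ x : Nat, (PySem.Int.bitLength (x : Int) + 7) / 8 = bLen x := by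
  intro x
  induction x using Nat.strong_induction_on with
  | _ x ih =>
    by_cases h0 : x = 0
    · simp [h0, PySem.Int.bitLength_zero, bLen_zero]
    · by_cases hs : x < 256
      · have hb : PySem.Int.bitLength (x : Int) = Nat.log2 x + 1 := by
          apply bitLength_unique
          · simp only [Nat.add_sub_cancel]
            exact Nat.log2_self_le h0
          · exact Nat.lt_log2_self
          · omega
        have hlog : Nat.log2 x ≤ 7 := by
          by_contra hc
          have : 2 ^ 8 ≤ 2 ^ Nat.log2 x := Nat.pow_le_pow_right (by norm_num) (by omega)
          have := Nat.log2_self_le h0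
          omega
        rw [hb, bLen_pos x h0]
        have : x / 256 = 0 := Nat.div_eq_of_lt hs
        rw [this, bLen_zero]
        omega
      · -- x ≥ 256 : bitLength x = bitLength (x/256) + 8
        push_neg at hs
        have hq0 : x / 256 ≠ 0 := by
          have : 1 ≤ x / 256 := (Nat.one_le_div_iff (by norm_num)).mpr hs
          omega
        have hqb : PySem.Int.bitLength ((x / 256 : Nat) : Int) = Nat.log2 (x / 256) + 1 := by
          apply bitLength_unique
          · simp only [Nat.add_sub_cancel]
            exact Nat.log2_self_le hq0
          · exact Nat.lt_log2_self
          · omega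
        have hxb : PySem.Int.bitLength (x : Int) = Nat.log2 (x / 256) + 9 := by
          apply bitLength_unique
          · have h1 : 2 ^ Nat.log2 (x / 256) ≤ x / 256 := Nat.log2_self_le hq0
            have h2 : x / 256 * 256 ≤ x := Nat.div_mul_le_self x 256
            calc 2 ^ (Nat.log2 (x / 256) + 9 - 1) = 2 ^ Nat.log2 (x / 256) * 256 := by
                  rw [show Nat.log2 (x / 256) + 9 - 1 = Nat.log2 (x / 256) + 8 by omega, pow_add]
                  norm_num
            _ ≤ x / 256 * 256 := by exact Nat.mul_le_mul_right 256 h1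
            _ ≤ x := h2
          · have h1 : x / 256 < 2 ^ (Nat.log2 (x / 256) + 1) := Nat.lt_log2_self
            have h2 : x < (x / 256 + 1) * 256 := by omega
            calc x < (x / 256 + 1) * 256 := h2
            _ ≤ 2 ^ (Nat.log2 (x / 256) + 1) * 256 := Nat.mul_le_mul_right 256 (by omega)
            _ = 2 ^ (Nat.log2 (x / 256) + 9) := by
                  rw [pow_add]; norm_num; ring
          · omega
        rw [hxb, bLen_pos x h0, ← ih (x / 256) (Nat.div_lt_self (Nat.pos_of_ne_zero h0) (by norm_num)), hqb]
        omega

lemma natCast_shiftRight8 (x : Nat) : ((x : Int) >>> (8:Nat)) = ((x / 256 : Nat) : Int) := by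
  simp [Int.shiftRight_eq_div_pow]

-- A's inner loop, characterized: j shifted past the bytes of x, plus 256 · byte-reversal of x
lemma loop_eq : ∀ fuel x : Nat, x < 256 ^ fuel → ∀ j : Int,
    byteRevLoop fuel (x : Int) j = j * 256 ^ bLen x + 256 * (revNat x : Int) := by
  intro fuel
  induction fuel with
  | zero =>
    intro x hx j
    interval_cases x
    simp [byteRevLoop, bLen_zero, revNat, leBytes]
  | succ f ih =>
    intro x hx j
    by_cases h0 : x = 0
    · simp [h0, byteRevLoop, bLen_zero, revNat, leBytes]
    · have hxz : (x : Int) ≠ 0 := by exact_mod_cast h0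
      simp only [byteRevLoop, hxz, if_false]
      rw [natCast_shiftRight8]
      have hmod : PySem.Int.mod (x : Int) 256 = ((x % 256 : Nat) : Int) := by
        exact_mod_cast PySem.Int.mod_natCast x 256
      rw [hmod]
      have hq : x / 256 < 256 ^ f := by
        rw [Nat.div_lt_iff_lt_mul (by norm_num)]
        calc x < 256 ^ (f + 1) := hx
        _ = 256 ^ f * 256 := by ring
      rw [ih (x / 256) hq]
      rw [bLen_pos x h0, revNat_rec x h0]
      simp only [Int.shiftLeft_eq]
      push_cast
      ring

lemma padWhile_eq : ∀ (f : Nat) (s : List Char), 8 - s.length ≤ f →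
    padWhile f s = List.replicate (8 - s.length) '0' ++ s := by
  intro f
  induction f with
  | zero =>
    intro s h
    have : 8 - s.length = 0 := by omega
    simp [padWhile, this]
  | succ g ih =>
    intro s h
    by_cases hl : s.length < 8
    · simp only [padWhile, hl, if_true]
      rw [ih ('0' :: s) (by simp; omega)]
      have hk : 8 - s.length = (8 - ('0' :: s).length) + 1 := by simp; omega
      rw [hk, List.replicate_succ' ]
      simp
    · have : 8 - s.length = 0 := by omega
      simp [padWhile, hl, this]

-- per element: A's padded hex chunk = B's padded hex chunk
lemma elem_eq (i : Int) (hi : 0 ≤ i) :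
    padWhile 8 (pyHex ((byteRevLoop (i.toNat + 1) i 0) >>> (8:Nat)))
    = (let n := (PySem.Int.bitLength i + 7) / 8
       let rev := (leBytes n i.toNat).foldl (fun a b => a * 256 + b) 0
       let s := Nat.toDigits 16 rev
       List.replicate (8 - s.length) '0' ++ s) := by
  obtain ⟨x, rfl⟩ := Int.eq_ofNat_of_zero_le hi
  have hfuel : x < 256 ^ (x + 1) := by
    calc x < 2 ^ (x + 1) :=
          Nat.lt_two_pow_self.trans (Nat.pow_lt_pow_right (by norm_num) (Nat.lt_succ_self x))
    _ ≤ 256 ^ (x + 1) := Nat.pow_le_pow_left (by norm_num) _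
  have htoNat : ((x : Int)).toNat = x := Int.toNat_natCast x
  rw [htoNat, loop_eq (x + 1) x hfuel 0]
  simp only [zero_mul, zero_add]
  have hsr : ((256 * (revNat x) : Nat) : Int) >>> (8:Nat) = ((revNat x : Nat) : Int) := by
    rw [show ((256 * revNat x : Nat) : Int) = (((256 * revNat x : Nat) : Nat) : Int) from rfl,
        natCast_shiftRight8]
    congr 1
    omega
  rw [show (256 : Int) * (revNat x : Int) = ((256 * revNat x : Nat) : Int) by push_cast; ring, hsr]
  have hhex : pyHex ((revNat x : Nat) : Int) = Nat.toDigits 16 (revNat x) := by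
    unfold pyHex
    rw [if_neg (not_lt.mpr (Int.natCast_nonneg _)), Int.toNat_natCast]
  rw [hhex, padWhile_eq 8 _ (by omega)]
  simp only [n_eq_bLen x]
  rfl

lemma fold_eq : ∀ (l : List Int) (acc : List Char), (∀ i ∈ l, 0 ≤ i) →
    l.foldl (fun acc i =>
      acc ++ padWhile 8 (pyHex ((byteRevLoop (i.toNat + 1) i 0) >>> (8:Nat)))) acc
    = acc ++ (l.map (fun i =>
        let n := (PySem.Int.bitLength i + 7) / 8
        let rev := (leBytes n i.toNat).foldl (fun a b => a * 256 + b) 0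
        let s := Nat.toDigits 16 rev
        List.replicate (8 - s.length) '0' ++ s)).flatten := by
  intro l
  induction l with
  | nil => intro acc _; simp
  | cons i t ih =>
    intro acc h
    simp only [List.foldl_cons, List.map_cons, List.flatten_cons]
    rw [ih _ (fun j hj => h j (List.mem_cons_of_mem i hj)),
        elem_eq i (h i (List.mem_cons_self ..))]
    simp [List.append_assoc]

-- ===== VERDICT (by name: the statement is the Claim_ definition above) =====
theorem re_hash_spec : Claim_equal_re_hash := by
  intro hash _ hpre
  unfold Spec_re_hash re_hash re_hash_alt
  rw [fold_eq hash [] hpre]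
  rfl
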